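-- pv_equiv track=rewrite | github.com/1zShot/AS_Python_1sem | 1.4lab/main.py | product_of_elements_right_of_max
-- ===== SOURCE A (Python) =====
-- def product_of_elements_right_of_max(lst):
--     if not lst:
--         return None
--     max_value = max(lst)
--     max_index = lst.index(max_value)
--     right_elements=lst[max_index+1:]
--     prod=1
--     for element in right_elements:
--         prod*=element
--     return prod if right_elements else None
-- ===== SOURCE B (Python) =====
-- def product_of_elements_right_of_max(lst):
--     if not lst:
--         return None
--     cur_max = lst[0]
--     prod = 1
--     has_right = False
--     for e in lst[1:]:
--         if e > cur_max:
--             cur_max = e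
--             prod = 1
--             has_right = False
--         else:
--             prod *= e
--             has_right = True
--     return prod if has_right else None
-- ===== Notes on version B (the rewrite author's own statement) =====
-- stated objective: simpler
-- what changed: Replaces A's four passes (max, .index, slice, product loop) with one left-to-right pass that maintains the running max, the product of elements seen since the last new max, and a has-right flag.
import Mathlib
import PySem

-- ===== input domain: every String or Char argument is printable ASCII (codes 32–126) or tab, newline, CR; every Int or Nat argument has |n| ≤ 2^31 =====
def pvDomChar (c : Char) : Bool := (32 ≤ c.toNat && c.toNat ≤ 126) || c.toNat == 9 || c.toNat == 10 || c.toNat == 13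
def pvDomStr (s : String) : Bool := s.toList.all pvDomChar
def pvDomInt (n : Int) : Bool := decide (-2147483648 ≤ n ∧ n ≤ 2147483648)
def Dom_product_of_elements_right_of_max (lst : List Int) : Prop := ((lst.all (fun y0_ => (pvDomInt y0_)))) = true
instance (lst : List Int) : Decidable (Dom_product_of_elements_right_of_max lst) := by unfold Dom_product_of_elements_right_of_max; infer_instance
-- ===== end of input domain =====

-- B replaces A's four passes (max, .index, slice, product loop) with one pass keeping the
-- running max, the product since the last new max, and a has-right flag (objective: simpler).

-- ===== PORT A =====
def product_of_elements_right_of_max (lst : List Int) : Option Int :=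
  if lst = [] then none
  else
    match PySem.List.max? lst (fun y => y) with
    | none => none  -- unreachable: lst ≠ []
    | some maxValue =>
      match PySem.List.index? lst maxValue with
      | none => none  -- unreachable: maxValue ∈ lst
      | some maxIndex =>
        let rightElements := PySem.List.slice lst (some ((maxIndex : Int) + 1)) none
        let prod := rightElements.foldl (fun a e => a * e) 1
        if rightElements ≠ [] then some prod else none

-- ===== PORT B =====
def product_of_elements_right_of_max_alt (lst : List Int) : Option Int :=
  match lst with
  | [] => none
  | x :: rest =>
    let final := rest.foldl
      (fun (s : Int × Int × Bool) e =>
        if s.1 < e then (e, (1 : Int), false) else (s.1, s.2.1 * e, true))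
      (x, 1, false)
    if final.2.2 then some final.2.1 else none

-- ===== PRECONDITION & SPEC =====
def Spec_product_of_elements_right_of_max (lst : List Int) (out : Option Int) : Prop := out = product_of_elements_right_of_max_alt lst
instance (lst : List Int) (out : Option Int) : Decidable (Spec_product_of_elements_right_of_max lst out) := by unfold Spec_product_of_elements_right_of_max; infer_instance

-- ===== CLAIM (what is proved, stated in full; the proofs are below) =====
def Claim_equal_product_of_elements_right_of_max : Prop := ∀ (lst : List Int), Dom_product_of_elements_right_of_max lst → Spec_product_of_elements_right_of_max lst (product_of_elements_right_of_max lst)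

-- ===== LEMMAS AND PROOFS =====

-- B's loop step
def pvStep (s : Int × Int × Bool) (e : Int) : Int × Int × Bool :=
  if s.1 < e then (e, (1 : Int), false) else (s.1, s.2.1 * e, true)

theorem pv_index?_of_mem (l : List Int) (a : Int) (h : a ∈ l) :
    PySem.List.index? l a = some (l.idxOf a) := by
  induction l with
  | nil => simp at h
  | cons b t ih =>
    by_cases hba : b = a
    · subst hba
      rw [PySem.List.index?_cons_self, List.idxOf_cons_self]
    · rcases List.mem_cons.mp h with rfl | hta
      · exact absurd rfl hba
      · rw [PySem.List.index?_cons_of_ne _ hba, ih hta, List.idxOf_cons_ne _ hba]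
        rfl

-- A on a nonempty list, characterised: max is the running max, suffix is a drop after idxOf.
theorem A_cons (x : Int) (t : List Int) :
    product_of_elements_right_of_max (x :: t) =
      (if (x :: t).drop ((x :: t).idxOf (t.foldl max x) + 1) = [] then none
       else some (((x :: t).drop ((x :: t).idxOf (t.foldl max x) + 1)).foldl (fun a e => a * e) 1)) := by
  have hmem : t.foldl max x ∈ x :: t := by
    rcases PySem.List.foldl_max_mem t x with h | h
    · rw [h]; exact List.mem_cons_self
    · exact List.mem_cons_of_mem _ h
  unfold product_of_elements_right_of_max
  rw [if_neg (List.cons_ne_nil x t), PySem.List.max?_id_cons]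
  dsimp only
  rw [pv_index?_of_mem _ _ hmem]
  dsimp only
  have hc : ((((x :: t).idxOf (t.foldl max x) : Nat) : Int) + 1)
      = (((((x :: t).idxOf (t.foldl max x)) + 1 : Nat)) : Int) := by push_cast; ring
  rw [hc, PySem.List.slice_from_natCast]
  by_cases he : (x :: t).drop ((x :: t).idxOf (t.foldl max x) + 1) = []
  · rw [if_neg (by simpa using he), if_pos he]
  · rw [if_pos he, if_neg he]

-- accumulator is irrelevant when some later element beats the current max
theorem pvStep_reset (xs : List Int) (m : Int) (h : ∃ z ∈ xs, m < z) :
    ∀ p b q c, xs.foldl pvStep (m, p, b) = xs.foldl pvStep (m, q, c) := by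
  induction xs with
  | nil => simp at h
  | cons a t ih =>
    intro p b q c
    simp only [List.foldl_cons, pvStep]
    by_cases hma : m < a
    · simp [hma]
    · simp only [if_neg hma]
      obtain ⟨z, hz, hmz⟩ := h
      rcases List.mem_cons.mp hz with rfl | hzt
      · exact absurd hmz hma
      · exact ih ⟨z, hzt, hmz⟩ (p * a) true (q * a) true

-- when nothing beats the current max the fold just multiplies
theorem pvStep_flat (xs : List Int) (m : Int) (h : ∀ z ∈ xs, z ≤ m) :
    ∀ p b, xs.foldl pvStep (m, p, b) = (m, xs.foldl (fun a e => a * e) p, b || !xs.isEmpty) := by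
  induction xs with
  | nil => intro p b; simp
  | cons a t ih =>
    intro p b
    have ha : ¬ m < a := not_lt.mpr (h a (List.mem_cons_self))
    simp only [List.foldl_cons, pvStep, if_neg ha]
    rw [ih (fun z hz => h z (List.mem_cons_of_mem _ hz)) (p * a) true]
    simp

def pvAns (s : Int × Int × Bool) : Option Int := if s.2.2 then some s.2.1 else none

theorem main_lemma (t : List Int) : ∀ x : Int,
    pvAns (t.foldl pvStep (x, 1, false)) = product_of_elements_right_of_max (x :: t) := by
  induction t with
  | nil =>
    intro x
    rw [A_cons]
    simp [pvAns]
  | cons y t ih =>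
    intro x
    by_cases hxy : x < y
    · -- a new max resets the state: reduce to the list y :: t
      have hstep : (y :: t).foldl pvStep (x, 1, false) = t.foldl pvStep (y, 1, false) := by
        simp [pvStep, hxy]
      have hm : (y :: t).foldl max x = t.foldl max y := by
        rw [List.foldl_cons, max_eq_right (le_of_lt hxy)]
      have hxm : x ≠ t.foldl max y :=
        ne_of_lt (lt_of_lt_of_le hxy (PySem.List.le_foldl_max t y).1)
      have hidx : (x :: y :: t).idxOf (t.foldl max y) = (y :: t).idxOf (t.foldl max y) + 1 := by
        rw [List.idxOf_cons_ne _ hxm]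
      rw [hstep, ih y, A_cons x (y :: t), A_cons y t, hm, hidx]
      simp only [List.drop_succ_cons]
    · have hyx : y ≤ x := not_lt.mp hxy
      have hstep : (y :: t).foldl pvStep (x, 1, false) = t.foldl pvStep (x, 1 * y, true) := by
        simp [pvStep, hxy]
      rw [hstep]
      by_cases hex : ∃ z ∈ t, x < z
      · -- a later element beats x: the accumulator is irrelevant, reduce to x :: t
        rw [pvStep_reset t x hex (1 * y) true 1 false, ih x, A_cons x (y :: t), A_cons x t]
        have hm : (y :: t).foldl max x = t.foldl max x := by
          rw [List.foldl_cons, max_eq_left hyx]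
        obtain ⟨z, hz, hxz⟩ := hex
        have hxm : x < t.foldl max x :=
          lt_of_lt_of_le hxz ((PySem.List.le_foldl_max t x).2 z hz)
        have hxne : x ≠ t.foldl max x := ne_of_lt hxm
        have hyne : y ≠ t.foldl max x := ne_of_lt (lt_of_le_of_lt hyx hxm)
        have h1 : (x :: y :: t).idxOf (t.foldl max x) = t.idxOf (t.foldl max x) + 1 + 1 := by
          rw [List.idxOf_cons_ne _ hxne, List.idxOf_cons_ne _ hyne]
        have h2 : (x :: t).idxOf (t.foldl max x) = t.idxOf (t.foldl max x) + 1 := by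
          rw [List.idxOf_cons_ne _ hxne]
        rw [hm, h1, h2]
        simp only [List.drop_succ_cons]
      · -- x stays the max: the fold just multiplies everything after x
        have hall : ∀ z ∈ t, z ≤ x := fun z hz => not_lt.mp fun h => hex ⟨z, hz, h⟩
        rw [pvStep_flat t x hall (1 * y) true]
        have hm : (y :: t).foldl max x = x := by
          rw [List.foldl_cons, max_eq_left hyx]
          rcases PySem.List.foldl_max_mem t x with h | h
          · exact h
          · exact le_antisymm (hall _ h) (PySem.List.le_foldl_max t x).1
        rw [A_cons x (y :: t), hm, List.idxOf_cons_self, List.drop_succ_cons,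
          List.drop_zero, if_neg (List.cons_ne_nil y t)]
        simp [pvAns, List.foldl_cons]

-- ===== VERDICT (by name: the statement is the Claim_ definition above) =====
theorem product_of_elements_right_of_max_spec : Claim_equal_product_of_elements_right_of_max := by
  intro lst _
  unfold Spec_product_of_elements_right_of_max
  cases lst with
  | nil => rfl
  | cons x t =>
    rw [← main_lemma t x]
    rfl
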